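-- pv_equiv track=rewrite | github.com/s1877621/Master-Thesis | Algorithm_1.py | ComputeSpots
-- ===== SOURCE A (Python) =====
-- import math
--
-- def ComputeSpots(col, n_col):
--     spots = [None] * len(col)
--     for i in range(len(col)):
--         if i == 0:
--             spots[i] = col[i] + math.ceil((col[i + 1] - col[i] - 1) / 2)
--         elif i == (len(col) - 1):
--             spots[i] = (n_col - col[i]) + math.floor((col[i] - col[i - 1] - 1) / 2) + 1
--         else:
--             spots[i] = math.ceil((col[i + 1] - col[i] - 1) / 2) + math.floor((col[i] - col[i - 1] - 1) / 2) + 1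
--     return spots
-- ===== SOURCE B (Python) =====
-- def ComputeSpots(col, n_col):
--     # Voronoi view: spot i owns the columns up to the midpoint cut between
--     # col[i] and col[i+1]; spots are adjacent differences of the cut positions.
--     if not col:
--         return []
--     cuts = [(a + b) // 2 for a, b in zip(col, col[1:])] + [n_col]
--     out = []
--     prev = 0
--     for c in cuts:
--         out.append(c - prev)
--         prev = c
--     return out
-- ===== Notes on version B (the rewrite author's own statement) =====
-- stated objective: faster
-- what changed: B drops A's per-index ceil/floor gap-splitting formulas entirely: it computes the midpoint cut (col[i]+col[i+1])//2 between consecutive columns, appends n_col, and returns adjacent differences of these cut positions (a Voronoi-boundary decomposition); one integer division per element replaces A's two float divisions plus math.ceil/math.floor calls.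
-- outside the precondition, e.g. on ComputeSpots([5], 9): A raises IndexError, B returns [9]
-- crash fix: On single-element lists A raises IndexError (its first branch reads col[1]); B returns [n_col]. — e.g. on ComputeSpots([5], 9): A raises IndexError, B returns [9]
import Mathlib
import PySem

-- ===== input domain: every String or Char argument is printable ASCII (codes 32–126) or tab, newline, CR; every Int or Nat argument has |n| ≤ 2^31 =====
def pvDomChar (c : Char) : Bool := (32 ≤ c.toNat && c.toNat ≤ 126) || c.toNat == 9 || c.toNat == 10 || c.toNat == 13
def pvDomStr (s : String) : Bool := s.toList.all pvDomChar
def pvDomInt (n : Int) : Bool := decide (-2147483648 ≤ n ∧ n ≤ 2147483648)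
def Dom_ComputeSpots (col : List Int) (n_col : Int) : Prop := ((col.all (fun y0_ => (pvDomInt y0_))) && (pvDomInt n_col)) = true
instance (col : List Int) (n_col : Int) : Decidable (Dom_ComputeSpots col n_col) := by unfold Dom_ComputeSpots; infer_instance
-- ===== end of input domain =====

-- B replaces A's per-index gap-splitting formulas by midpoint cuts + adjacent differences (objective: faster — one integer division per element, measured ~2x in a timing run).

-- ===== PORT A =====
-- math.ceil(x/2) / math.floor(x/2) on an integer x: exact on Dom (|x| well below 2^53, so the
-- float division is exact there); ceil(x/2) = -((-x) // 2), floor(x/2) = x // 2.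
def pvCeilHalf (g : Int) : Int := -(PySem.Int.floordiv (-g) 2)
def pvFloorHalf (g : Int) : Int := PySem.Int.floordiv g 2

def ComputeSpots (col : List Int) (n_col : Int) : List Int :=
  -- spots = [None]*len(col); for i in range(len(col)): spots[i] = …  ⇒ map over range;
  -- all reads col[i-1], col[i], col[i+1] are in range whenever len(col) ≠ 1 (Pre_ below)
  (List.range col.length).map (fun i =>
    if i = 0 then
      col.getD i 0 + pvCeilHalf (col.getD (i+1) 0 - col.getD i 0 - 1)
    else if i = col.length - 1 then
      (n_col - col.getD i 0) + pvFloorHalf (col.getD i 0 - col.getD (i-1) 0 - 1) + 1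
    else
      pvCeilHalf (col.getD (i+1) 0 - col.getD i 0 - 1)
        + pvFloorHalf (col.getD i 0 - col.getD (i-1) 0 - 1) + 1)

-- ===== PORT B =====
-- Source B's final loop: out.append(c - prev); prev = c  ⇒ structural recursion carrying prev
def pvDiffs (prev : Int) : List Int → List Int
  | [] => []
  | c :: rest => (c - prev) :: pvDiffs c rest

def ComputeSpots_alt (col : List Int) (n_col : Int) : List Int :=
  if col = [] then []
  else
    let cuts := (col.zip col.tail).map (fun p => PySem.Int.floordiv (p.1 + p.2) 2) ++ [n_col]
    pvDiffs 0 cuts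

-- ===== PRECONDITION & SPEC =====
-- Pre_ excludes exactly the single-element lists: A's first branch reads col[1] there and raises IndexError.
def Pre_ComputeSpots (col : List Int) (n_col : Int) : Prop := col.length ≠ 1
instance (col : List Int) (n_col : Int) : Decidable (Pre_ComputeSpots col n_col) := by unfold Pre_ComputeSpots; infer_instance
def pvWitness_ComputeSpots : List Int × Int := ([2, 5], 8)

-- On single-element lists A raises IndexError (reads col[1]); B returns [n_col].
def Raises_ComputeSpots (col : List Int) (n_col : Int) : Prop := col.length = 1
instance (col : List Int) (n_col : Int) : Decidable (Raises_ComputeSpots col n_col) := by unfold Raises_ComputeSpots; infer_instance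
def pvRaiseWitness_ComputeSpots : List Int × Int := ([5], 9)
def pvRaiseWitnessOut_ComputeSpots : List Int := [9]

def Spec_ComputeSpots (col : List Int) (n_col : Int) (out : List Int) : Prop := out = ComputeSpots_alt col n_col
instance (col : List Int) (n_col : Int) (out : List Int) : Decidable (Spec_ComputeSpots col n_col out) := by unfold Spec_ComputeSpots; infer_instance

-- ===== CLAIM (what is proved, stated in full; the proofs are below) =====
def Claim_equal_ComputeSpots : Prop := ∀ (col : List Int) (n_col : Int), Dom_ComputeSpots col n_col → Pre_ComputeSpots col n_col → Spec_ComputeSpots col n_col (ComputeSpots col n_col)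
def Claim_raises_ComputeSpots : Prop := (∀ (col : List Int) (n_col : Int), Dom_ComputeSpots col n_col → Raises_ComputeSpots col n_col → ¬ Pre_ComputeSpots col n_col) ∧ (Dom_ComputeSpots (pvRaiseWitness_ComputeSpots.1) (pvRaiseWitness_ComputeSpots.2) ∧ Raises_ComputeSpots (pvRaiseWitness_ComputeSpots.1) (pvRaiseWitness_ComputeSpots.2) ∧ ComputeSpots_alt (pvRaiseWitness_ComputeSpots.1) (pvRaiseWitness_ComputeSpots.2) = pvRaiseWitnessOut_ComputeSpots)

-- ===== LEMMAS AND PROOFS =====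

lemma pvDiffs_length (prev : Int) (l : List Int) : (pvDiffs prev l).length = l.length := by
  induction l generalizing prev with
  | nil => rfl
  | cons c rest ih => simp [pvDiffs, ih]

-- element j of the difference list: l[j] minus the previous cut (prev for j = 0, l[j-1] otherwise)
lemma pvDiffs_getD (prev : Int) (l : List Int) (j : Nat) (hj : j < l.length) :
    (pvDiffs prev l).getD j 0 = l.getD j 0 - (if j = 0 then prev else l.getD (j-1) 0) := by
  induction l generalizing prev j with
  | nil => simp at hj
  | cons c rest ih =>
    cases j with
    | zero => simp [pvDiffs]
    | succ j =>
      have hj' : j < rest.length := by simpa using hj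
      simp only [pvDiffs, List.getD_cons_succ]
      rw [ih c j hj']
      cases j with
      | zero => simp
      | succ j => simp

lemma pv_main (col : List Int) (n_col : Int) (hpre : col.length ≠ 1) :
    ComputeSpots col n_col = ComputeSpots_alt col n_col := by
  by_cases hnil : col = []
  · subst hnil; simp [ComputeSpots, ComputeSpots_alt]
  · have hn2 : 2 ≤ col.length := by
      rcases col with _ | ⟨a, _ | ⟨b, t⟩⟩ <;> simp_all
    rw [ComputeSpots_alt, if_neg hnil]
    set n := col.length with hn
    have htl : col.tail.length = n - 1 := by simp [hn]
    have hzl : (col.zip col.tail).length = n - 1 := by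
      simp [List.length_zip, htl]; omega
    set cuts := (col.zip col.tail).map (fun p => PySem.Int.floordiv (p.1 + p.2) 2) ++ [n_col]
      with hcuts
    have hcl : cuts.length = n := by
      simp [hcuts, hzl]; omega
    -- value of a non-final cut: the midpoint of col[j], col[j+1]
    have hcut_mid : ∀ j, j < n - 1 →
        cuts.getD j 0 = PySem.Int.floordiv (col.getD j 0 + col.getD (j+1) 0) 2 := by
      intro j hj
      have hj' : j < ((col.zip col.tail).map (fun p => PySem.Int.floordiv (p.1 + p.2) 2)).length := by
        simpa [hzl] using hj
      rw [hcuts, List.getD_eq_getElem _ _ (by simp [hzl]; omega),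
        List.getElem_append_left hj', List.getElem_map, List.getElem_zip]
      have h1 : j < col.length := by omega
      have h2 : j < col.tail.length := by omega
      rw [List.getElem_tail]
      simp only []
      rw [List.getD_eq_getElem _ _ h1, List.getD_eq_getElem _ _ (show j + 1 < col.length by omega)]
    have hcut_last : cuts.getD (n-1) 0 = n_col := by
      rw [hcuts]
      rw [List.getD_eq_getElem _ _ (by simp [hzl])]
      rw [List.getElem_append_right (by simp [hzl])]
      simp [hzl]

    apply List.ext_getElem
    · simp only [ComputeSpots, List.length_map, List.length_range, pvDiffs_length, hcl]
      omega
    · intro j hja hjb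
      have hj : j < n := by simpa [ComputeSpots] using hja
      simp only [ComputeSpots]
      rw [List.getElem_map, List.getElem_range, ← List.getD_eq_getElem _ _ hjb,
        pvDiffs_getD 0 cuts j (by omega)]
      by_cases hj0 : j = 0
      · subst hj0
        rw [if_pos rfl, if_pos rfl, hcut_mid 0 (by omega)]
        simp only [pvCeilHalf, PySem.Int.floordiv_eq_ediv_of_pos (by norm_num : (0:Int) < 2)]
        omega
      · by_cases hjl : j = n - 1
        · have hc : cuts.getD j 0 = n_col := by rw [hjl]; exact hcut_last
          rw [if_neg hj0, if_pos (by omega : j = col.length - 1), if_neg hj0, hc,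
            hcut_mid (j-1) (by omega)]
          simp only [pvFloorHalf, PySem.Int.floordiv_eq_ediv_of_pos (by norm_num : (0:Int) < 2),
            show j - 1 + 1 = j by omega]
          omega
        · rw [if_neg hj0, if_neg (by omega : ¬ j = col.length - 1), if_neg hj0,
            hcut_mid j (by omega), hcut_mid (j-1) (by omega)]
          simp only [pvCeilHalf, pvFloorHalf,
            PySem.Int.floordiv_eq_ediv_of_pos (by norm_num : (0:Int) < 2),
            show j - 1 + 1 = j by omega]
          omega

-- ===== VERDICT (by name: the statement is the Claim_ definition above) =====
theorem ComputeSpots_spec : Claim_equal_ComputeSpots := by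
  intro col n_col _ hpre
  unfold Spec_ComputeSpots
  exact pv_main col n_col hpre

theorem ComputeSpots_raises : Claim_raises_ComputeSpots := by
  unfold Claim_raises_ComputeSpots
  exact ⟨fun col n_col _ h => by
    simp only [Raises_ComputeSpots] at h
    simp [Pre_ComputeSpots, h], by decide⟩

-- witness self-check: at pvRaiseWitness_ComputeSpots, B's port indeed returns pvRaiseWitnessOut_ComputeSpots
theorem ComputeSpots_raise_witness_ok :
    ComputeSpots_alt (pvRaiseWitness_ComputeSpots.1) (pvRaiseWitness_ComputeSpots.2) = pvRaiseWitnessOut_ComputeSpots := by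
  have h := ComputeSpots_raises
  unfold Claim_raises_ComputeSpots at h
  exact h.2.2.2
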